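-- pv_equiv track=rewrite | github.com/Anujrathee7/Anujrathee7 | Fundamental of programming/my_stats.py | my_mode
-- ===== SOURCE A (Python) =====
-- def my_mode(L):
--     frequency = {}
--     for num in L:
--         if num in frequency:
--             frequency[num] += 1
--         else:
--             frequency[num] = 1
--
--     max_freq = max(frequency.values())
--     modes = [num for num, freq in frequency.items() if freq == max_freq]
--
--     return max(modes)
-- ===== SOURCE B (Python) =====
-- def my_mode(L):
--     best = None
--     best_count = 0
--     prev = None
--     run_count = 0
--     for x in sorted(L):
--         run_count = run_count + 1 if x == prev else 1
--         prev = x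
--         if run_count >= best_count:
--             best = x
--             best_count = run_count
--     if best is None:
--         raise ValueError("my_mode() arg is an empty sequence")
--     return best
-- ===== Notes on version B (the rewrite author's own statement) =====
-- stated objective: alternative
-- what changed: Replaced the frequency-dictionary build plus two reductions (max over values, filter, max over modes) by a single run-length scan over the ascending-sorted list that keeps the best (value, run length) seen, updating on >= so the largest value wins frequency ties.
import Mathlib
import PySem

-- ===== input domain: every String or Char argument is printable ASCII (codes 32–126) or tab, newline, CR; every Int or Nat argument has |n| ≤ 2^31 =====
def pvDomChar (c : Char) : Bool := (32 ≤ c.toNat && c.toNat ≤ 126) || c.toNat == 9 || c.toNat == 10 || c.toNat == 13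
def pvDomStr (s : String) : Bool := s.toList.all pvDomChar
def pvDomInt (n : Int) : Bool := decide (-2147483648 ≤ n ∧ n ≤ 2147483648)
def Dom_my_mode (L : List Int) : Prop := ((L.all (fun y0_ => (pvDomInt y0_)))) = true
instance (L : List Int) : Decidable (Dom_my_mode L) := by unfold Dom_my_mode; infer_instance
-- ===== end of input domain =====

-- B replaces A's frequency dict plus two reductions (max of counts, filter, max of modes)
-- by a sort followed by one run-length scan (alternative decomposition, same result).

-- ===== PORT A =====
def my_mode (L : List Int) : Int :=
  let frequency : PySem.Dict Int Int :=
    L.foldl (fun d num =>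
      if d.contains num then d.insert num (d.getD num 0 + 1)
      else d.insert num 1) PySem.Dict.empty
  -- max(frequency.values()): raises ValueError when L = [] (excluded by Pre_); .getD 0 is unreachable there
  let max_freq : Int := (PySem.List.max? frequency.values (fun v => v)).getD 0
  let modes : List Int :=
    frequency.items.foldl (fun acc p => if p.2 == max_freq then acc ++ [p.1] else acc) []
  (PySem.List.max? modes (fun v => v)).getD 0

-- ===== PORT B =====
-- state = (best, best_count, prev, run_count)
def modeStep (st : Option Int × Int × Option Int × Int) (x : Int) :
    Option Int × Int × Option Int × Int :=
  let run_count : Int := if some x = st.2.2.1 then st.2.2.2 + 1 else 1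
  if run_count ≥ st.2.1 then (some x, run_count, some x, run_count)
  else (st.1, st.2.1, some x, run_count)

def my_mode_alt (L : List Int) : Int :=
  let fin := (PySem.List.sorted L (fun v => v)).foldl modeStep (none, 0, none, 0)
  -- best is None only for L = [] (excluded by Pre_), where the Python raises ValueError
  fin.1.getD 0

-- ===== PRECONDITION & SPEC =====
-- Pre_ excludes only the empty list, on which A raises ValueError (max of an empty sequence).
def Pre_my_mode (L : List Int) : Prop := L ≠ []
instance (L : List Int) : Decidable (Pre_my_mode L) := by unfold Pre_my_mode; infer_instance
def pvWitness_my_mode : List Int := [1, 2, 2]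

def Spec_my_mode (L : List Int) (out : Int) : Prop := out = my_mode_alt L
instance (L : List Int) (out : Int) : Decidable (Spec_my_mode L out) := by unfold Spec_my_mode; infer_instance

-- ===== CLAIM (what is proved, stated in full; the proofs are below) =====
def Claim_equal_my_mode : Prop := ∀ (L : List Int), Dom_my_mode L → Pre_my_mode L → Spec_my_mode L (my_mode L)

-- ===== LEMMAS AND PROOFS =====

-- the common characterisation: m is the largest value of maximal multiplicity in L
def IsMode (L : List Int) (m : Int) : Prop :=
  m ∈ L ∧ ∀ y ∈ L, L.count y ≤ L.count m ∧ (L.count y = L.count m → y ≤ m)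

theorem isMode_unique {L : List Int} {a b : Int} (ha : IsMode L a) (hb : IsMode L b) : a = b := by
  obtain ⟨hma, hA⟩ := ha
  obtain ⟨hmb, hB⟩ := hb
  obtain ⟨h1, h1'⟩ := hA b hmb
  obtain ⟨h2, h2'⟩ := hB a hma
  have hc : L.count a = L.count b := le_antisymm h2 h1
  exact le_antisymm (h2' hc) (h1' hc.symm)

theorem my_mode_isMode {L : List Int} (h : L ≠ []) : IsMode L (my_mode L) := by
  have hfreq : L.foldl (fun d num =>
      if d.contains num then d.insert num (d.getD num 0 + 1) else d.insert num 1)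
      PySem.Dict.empty = PySem.Dict.counter L := by
    rw [← PySem.Dict.foldl_insert_getD_add_one_eq_counter]
    apply PySem.List.foldl_congr_mem
    intro d x _
    by_cases hc : d.contains x
    · simp [hc]
    · rw [if_neg hc, PySem.Dict.getD_of_not_contains d 0 (by simpa using hc)]
      norm_num
  have hvals : (PySem.Dict.counter L).values
      = (PySem.Set.ofList L).map (fun k => ((L.count k : Nat) : Int)) := by
    show ((PySem.Dict.counter L).items.map (·.2)) = _
    rw [PySem.Dict.items_counter, List.map_map]
    rfl
  have hSne : (PySem.Set.ofList L : List Int) ≠ [] := by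
    obtain ⟨a, t, rfl⟩ := List.exists_cons_of_ne_nil h
    intro hS
    have : a ∈ PySem.Set.ofList (a :: t) := (PySem.Set.mem_ofList _ _).mpr (by simp)
    rw [hS] at this
    exact absurd this (List.not_mem_nil)
  obtain ⟨k0, S, hS⟩ := List.exists_cons_of_ne_nil hSne
  -- max_freq = running max over the (nonempty) values list
  have hvals' : (PySem.Dict.counter L).values
      = ((L.count k0 : Nat) : Int) :: S.map (fun k => ((L.count k : Nat) : Int)) := by
    rw [hvals, hS]; rfl
  set M : Int := (S.map (fun k => ((L.count k : Nat) : Int))).foldl max ((L.count k0 : Nat) : Int)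
    with hM
  have hmax : (PySem.List.max? (PySem.Dict.counter L).values (fun v => v)).getD 0 = M := by
    rw [hvals', PySem.List.max?_id_cons]
    rfl
  have hub : ∀ k ∈ PySem.Set.ofList L, ((L.count k : Nat) : Int) ≤ M := by
    intro k hk
    rw [hS] at hk
    rcases List.mem_cons.mp hk with rfl | hk'
    · exact (PySem.List.le_foldl_max _ _).1
    · exact (PySem.List.le_foldl_max _ _).2 _ (List.mem_map_of_mem hk')
  have hMmem : ∃ k ∈ PySem.Set.ofList L, ((L.count k : Nat) : Int) = M := by
    rcases PySem.List.foldl_max_mem (S.map (fun k => ((L.count k : Nat) : Int)))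
        ((L.count k0 : Nat) : Int) with he | hm
    · exact ⟨k0, by rw [hS]; simp, he.symm⟩
    · obtain ⟨k, hk, hke⟩ := List.mem_map.mp hm
      exact ⟨k, by rw [hS]; exact List.mem_cons_of_mem _ hk, hke⟩
  -- the modes list
  have hmodes : ∀ (M' : Int), (PySem.Dict.counter L).items.foldl
      (fun acc p => if p.2 == M' then acc ++ [p.1] else acc) []
      = (PySem.Set.ofList L).filter (fun k => ((L.count k : Nat) : Int) == M') := by
    intro M'
    rw [PySem.List.foldl_append_if, PySem.Dict.items_counter, List.filter_map, List.map_map]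
    simp [Function.comp_def]
  -- unfold the port and rewrite
  unfold my_mode
  simp only [hfreq, hmax, hmodes]
  have hMne : (PySem.Set.ofList L).filter (fun k => ((L.count k : Nat) : Int) == M) ≠ [] := by
    obtain ⟨k, hk, hke⟩ := hMmem
    intro hnil
    have : k ∈ (PySem.Set.ofList L).filter (fun k => ((L.count k : Nat) : Int) == M) :=
      List.mem_filter.mpr ⟨hk, by simp [hke]⟩
    rw [hnil] at this
    exact absurd this (List.not_mem_nil)
  obtain ⟨m0, ms, hms⟩ := List.exists_cons_of_ne_nil hMne
  rw [hms, PySem.List.max?_id_cons]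
  set R : Int := ms.foldl max m0 with hR
  show IsMode L R
  have hRmodes : R ∈ m0 :: ms := by
    rcases PySem.List.foldl_max_mem ms m0 with he | hm
    · rw [hR, he]; simp
    · exact List.mem_cons_of_mem _ hm
  have hRub : ∀ y ∈ m0 :: ms, y ≤ R := by
    intro y hy
    rcases List.mem_cons.mp hy with rfl | hy'
    · exact (PySem.List.le_foldl_max _ _).1
    · exact (PySem.List.le_foldl_max _ _).2 _ hy'
  rw [← hms] at hRmodes hRub
  have hRf := List.mem_filter.mp hRmodes
  have hRS : R ∈ PySem.Set.ofList L := hRf.1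
  have hRc : ((L.count R : Nat) : Int) = M := by simpa using hRf.2
  refine ⟨(PySem.Set.mem_ofList L R).mp hRS, ?_⟩
  intro y hy
  have hyS : y ∈ PySem.Set.ofList L := (PySem.Set.mem_ofList L y).mpr hy
  have h1 : ((L.count y : Nat) : Int) ≤ M := hub y hyS
  constructor
  · omega
  · intro he
    have : ((L.count y : Nat) : Int) = M := by omega
    exact hRub y (List.mem_filter.mpr ⟨hyS, by simp [this]⟩)

theorem last_is_max {p : List Int} {l : Int}
    (hp : p.Pairwise (· ≤ ·)) (hl : p.getLast? = some l) : ∀ y ∈ p, y ≤ l := by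
  induction p with
  | nil => simp at hl
  | cons a t ih =>
    intro y hy
    cases ht : t with
    | nil =>
      subst ht
      simp at hl hy
      omega
    | cons c u =>
      have hl' : t.getLast? = some l := by
        subst ht; rw [List.getLast?_cons_cons] at hl; exact hl
      have hpt := hp.of_cons
      rcases List.mem_cons.mp hy with rfl | hyt
      · have hmem : l ∈ t := List.mem_of_getLast? hl'
        exact (List.pairwise_cons.mp hp).1 l hmem
      · exact ih hpt hl' y hyt

def ModeInv (p : List Int) (st : Option Int × Int × Option Int × Int) : Prop :=
  (p = [] ∧ st = (none, 0, none, 0)) ∨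
  (∃ b l, p.getLast? = some l ∧
    st = (some b, ((p.count b : Nat) : Int), some l, ((p.count l : Nat) : Int)) ∧
    b ∈ p ∧ ∀ y ∈ p, p.count y ≤ p.count b ∧ (p.count y = p.count b → y ≤ b))

theorem modeStep_inv {p : List Int} {st : Option Int × Int × Option Int × Int} {x : Int}
    (hst : ModeInv p st) (hx : ∀ y ∈ p, y ≤ x) (hp : p.Pairwise (· ≤ ·)) :
    ModeInv (p ++ [x]) (modeStep st x) := by
  rcases hst with ⟨rfl, rfl⟩ | ⟨b, l, hl, rfl, hb, hspec⟩
  · refine Or.inr ⟨x, x, by simp, by simp [modeStep], by simp, ?_⟩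
    intro y hy
    simp only [List.nil_append, List.mem_singleton] at hy
    subst hy
    exact ⟨le_refl _, fun _ => le_refl _⟩
  · have hlp : ∀ y ∈ p, y ≤ l := last_is_max hp hl
    have hlm : l ∈ p := List.mem_of_getLast? hl
    have hlast : (p ++ [x]).getLast? = some x := by simp
    have hcount : ∀ y : Int, (p ++ [x]).count y = p.count y + (if x = y then 1 else 0) := by
      intro y
      simp [List.count_append, List.count_singleton]
    by_cases hxl : x = l
    · subst hxl
      by_cases hge : ((p.count x : Nat) : Int) + 1 ≥ ((p.count b : Nat) : Int)
      · have hstep : modeStep (some b, ((p.count b : Nat) : Int), some x, ((p.count x : Nat) : Int)) x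
            = (some x, ((p.count x : Nat) : Int) + 1, some x, ((p.count x : Nat) : Int) + 1) := by
          simp [modeStep, hge]
        rw [hstep]
        have hcx : (p ++ [x]).count x = p.count x + 1 := by rw [hcount]; simp
        refine Or.inr ⟨x, x, hlast, by rw [hcx]; push_cast; rfl, by simp, ?_⟩
        intro y hy
        constructor
        · rw [hcount y, hcount x]
          by_cases hyx : y = x
          · subst hyx; simp
          · have hyp : y ∈ p := by
              rcases List.mem_append.mp hy with h' | h'
              · exact h'
              · simp at h'; omega
            have h1 := (hspec y hyp).1
            have hge' : p.count b ≤ p.count x + 1 := by exact_mod_cast hge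
            rw [if_neg (fun h : x = y => hyx h.symm), if_pos rfl]
            omega
        · intro _
          rcases List.mem_append.mp hy with h' | h'
          · exact hx y h'
          · simp at h'; omega
      · have hbx : b ≠ x := by
          intro hbe; subst hbe; omega
        have hstep : modeStep (some b, ((p.count b : Nat) : Int), some x, ((p.count x : Nat) : Int)) x
            = (some b, ((p.count b : Nat) : Int), some x, ((p.count x : Nat) : Int) + 1) := by
          simp [modeStep, hge]
        rw [hstep]
        have hcx : (p ++ [x]).count x = p.count x + 1 := by rw [hcount]; simp
        have hcb : (p ++ [x]).count b = p.count b := by rw [hcount]; simp [Ne.symm hbx]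
        refine Or.inr ⟨b, x, hlast, by rw [hcx, hcb]; push_cast; rfl,
          List.mem_append_left _ hb, ?_⟩
        intro y hy
        by_cases hyx : y = x
        · rw [hyx, hcx, hcb]
          exact ⟨by omega, fun he => absurd he (by omega)⟩
        · have hyp : y ∈ p := by
            rcases List.mem_append.mp hy with h' | h'
            · exact h'
            · simp at h'; omega
          have hcy : (p ++ [x]).count y = p.count y := by rw [hcount]; simp [Ne.symm hyx]
          rw [hcy, hcb]
          exact hspec y hyp
    · -- x starts a new run: x does not occur in p
      have hxnp : x ∉ p := fun hmem => hxl (le_antisymm (hlp x hmem) (hx l hlm))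
      have hcx0 : p.count x = 0 := List.count_eq_zero.mpr hxnp
      have hcx : (p ++ [x]).count x = 1 := by rw [hcount]; simp [hcx0]
      have hcbpos : 0 < p.count b := List.count_pos_iff.mpr hb
      have hbx : b ≠ x := fun hbe => hxnp (hbe ▸ hb)
      have hcb : (p ++ [x]).count b = p.count b := by rw [hcount]; simp [Ne.symm hbx]
      by_cases hge : (1 : Int) ≥ ((p.count b : Nat) : Int)
      · have hcb1 : p.count b = 1 := by omega
        have hstep : modeStep (some b, ((p.count b : Nat) : Int), some l, ((p.count l : Nat) : Int)) x
            = (some x, 1, some x, 1) := by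
          simp [modeStep, hxl, hge]
        rw [hstep]
        refine Or.inr ⟨x, x, hlast, by rw [hcx]; push_cast; rfl, by simp, ?_⟩
        intro y hy
        by_cases hyx : y = x
        · rw [hyx]; exact ⟨le_refl _, fun _ => le_refl _⟩
        · have hyp : y ∈ p := by
            rcases List.mem_append.mp hy with h' | h'
            · exact h'
            · simp at h'; omega
          have hcy : (p ++ [x]).count y = p.count y := by rw [hcount]; simp [Ne.symm hyx]
          have h1 := (hspec y hyp).1
          rw [hcy, hcx]
          exact ⟨by omega, fun _ => hx y hyp⟩
      · have hstep : modeStep (some b, ((p.count b : Nat) : Int), some l, ((p.count l : Nat) : Int)) x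
            = (some b, ((p.count b : Nat) : Int), some x, 1) := by
          simp [modeStep, hxl, hge]
        rw [hstep]
        refine Or.inr ⟨b, x, hlast, by rw [hcx, hcb]; push_cast; rfl,
          List.mem_append_left _ hb, ?_⟩
        intro y hy
        by_cases hyx : y = x
        · rw [hyx, hcx, hcb]
          exact ⟨by omega, fun he => absurd he (by omega)⟩
        · have hyp : y ∈ p := by
            rcases List.mem_append.mp hy with h' | h'
            · exact h'
            · simp at h'; omega
          have hcy : (p ++ [x]).count y = p.count y := by rw [hcount]; simp [Ne.symm hyx]
          rw [hcy, hcb]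
          exact hspec y hyp

theorem foldl_modeStep_inv (s : List Int) (hs : s.Pairwise (· ≤ ·)) :
    ModeInv s (s.foldl modeStep (none, 0, none, 0)) := by
  induction s using List.reverseRecOn with
  | nil => exact Or.inl ⟨rfl, rfl⟩
  | append_singleton t x ih =>
    rw [List.foldl_append]
    have h := List.pairwise_append.mp hs
    exact modeStep_inv (ih h.1) (fun y hy => h.2.2 y hy x (by simp)) h.1

theorem my_mode_alt_isMode {L : List Int} (h : L ≠ []) : IsMode L (my_mode_alt L) := by
  have hperm : (PySem.List.sorted L (fun v => v)).Perm L :=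
    PySem.List.sorted_perm L (fun v => v) false
  have hpair : (PySem.List.sorted L (fun v => v)).Pairwise (· ≤ ·) :=
    PySem.List.sorted_pairwise L (fun v => v)
  have hinv := foldl_modeStep_inv (PySem.List.sorted L (fun v => v)) hpair
  have hsne : PySem.List.sorted L (fun v => v) ≠ [] := by
    intro hnil
    exact h ((PySem.List.sorted_eq_nil_iff L _ false).mp hnil)
  rcases hinv with ⟨hnil, _⟩ | ⟨b, l, hl, hst, hb, hspec⟩
  · exact absurd hnil hsne
  · have hres : my_mode_alt L = b := by
      unfold my_mode_alt
      rw [hst]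
      rfl
    rw [hres]
    refine ⟨hperm.mem_iff.mp hb, ?_⟩
    intro y hy
    have hy' : y ∈ PySem.List.sorted L (fun v => v) := hperm.mem_iff.mpr hy
    have hc1 := hperm.count_eq y
    have hc2 := hperm.count_eq b
    obtain ⟨h1, h2⟩ := hspec y hy'
    exact ⟨by omega, fun he => h2 (by omega)⟩

-- ===== VERDICT (by name: the statement is the Claim_ definition above) =====
theorem my_mode_spec : Claim_equal_my_mode := by
  intro L _ hpre
  unfold Spec_my_mode
  exact isMode_unique (my_mode_isMode hpre) (my_mode_alt_isMode hpre)
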